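-- pv_equiv track=rewrite | github.com/jiangkb/paramerselect | ParamerManager.py | getTableByName
-- ===== SOURCE A (Python) =====
-- def getTableByName(filestr, tableName, nextTableName):
--     start, end = 0, 0
--     current = 0
--     for line in filestr.splitlines():
--         if (line.find(tableName) >= 0):
--             start = current
--         if (line.find(nextTableName) >= 0):
--             end = current
--         current += 1
--     return start, end
-- ===== SOURCE B (Python) =====
-- def getTableByName(filestr, tableName, nextTableName):
--     lines = filestr.splitlines()
--     def last_line_containing(name):
--         for i in range(len(lines) - 1, -1, -1):
--             if lines[i].find(name) >= 0:
--                 return i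
--         return 0
--     return last_line_containing(tableName), last_line_containing(nextTableName)
-- ===== Notes on version B (the rewrite author's own statement) =====
-- stated objective: alternative
-- what changed: One forward pass maintaining two last-seen counters is replaced by two independent reverse scans over the split lines, each returning at the first (i.e. last) matching line with early termination.
import Mathlib
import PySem

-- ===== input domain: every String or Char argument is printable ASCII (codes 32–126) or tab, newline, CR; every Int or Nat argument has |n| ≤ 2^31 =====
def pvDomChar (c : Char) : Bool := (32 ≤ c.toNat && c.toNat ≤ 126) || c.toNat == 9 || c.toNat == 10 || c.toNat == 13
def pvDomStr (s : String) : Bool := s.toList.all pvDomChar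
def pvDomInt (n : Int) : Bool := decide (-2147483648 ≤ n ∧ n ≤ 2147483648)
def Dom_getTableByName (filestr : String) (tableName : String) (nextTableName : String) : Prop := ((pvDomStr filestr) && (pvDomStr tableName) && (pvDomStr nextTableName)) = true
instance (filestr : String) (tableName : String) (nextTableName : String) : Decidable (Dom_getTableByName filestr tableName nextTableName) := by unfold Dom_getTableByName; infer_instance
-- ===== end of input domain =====

-- B replaces A's single forward pass maintaining two last-seen counters by two
-- independent reverse scans with early termination (objective: alternative decomposition).


-- ===== PORT A =====
-- for line in filestr.splitlines(): update (start, end, current)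
def getTableByName (filestr : String) (tableName : String) (nextTableName : String) : Int × Int :=
  let r := (PySem.Str.splitlines filestr).foldl
    (fun (st : Int × Int × Int) line =>
      let start := if PySem.Str.find line tableName ≥ 0 then st.2.2 else st.1
      let e := if PySem.Str.find line nextTableName ≥ 0 then st.2.2 else st.2.1
      (start, e, st.2.2 + 1))
    (0, 0, 0)
  (r.1, r.2.1)

-- ===== PORT B =====
-- for i in range(len(lines)-1, -1, -1): if lines[i].find(name) >= 0: return i; return 0
-- (the descending index loop over `lines` is ported as structural recursion on the
--  reversed enumerated line list)
def lastLineContaining (revLines : List (Int × String)) (name : String) : Int :=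
  match revLines with
  | [] => 0
  | (i, l) :: rest => if PySem.Str.find l name ≥ 0 then i else lastLineContaining rest name

def getTableByName_alt (filestr : String) (tableName : String) (nextTableName : String) : Int × Int :=
  let lines := PySem.Str.splitlines filestr
  let rev := (PySem.List.enumerate lines).reverse
  (lastLineContaining rev tableName, lastLineContaining rev nextTableName)

-- ===== PRECONDITION & SPEC =====
def Spec_getTableByName (filestr : String) (tableName : String) (nextTableName : String) (out : Int × Int) : Prop := out = getTableByName_alt filestr tableName nextTableName
instance (filestr : String) (tableName : String) (nextTableName : String) (out : Int × Int) : Decidable (Spec_getTableByName filestr tableName nextTableName out) := by unfold Spec_getTableByName; infer_instance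

-- ===== CLAIM (what is proved, stated in full; the proofs are below) =====
def Claim_equal_getTableByName : Prop := ∀ (filestr : String) (tableName : String) (nextTableName : String), Dom_getTableByName filestr tableName nextTableName → Spec_getTableByName filestr tableName nextTableName (getTableByName filestr tableName nextTableName)

-- ===== LEMMAS AND PROOFS =====

-- generalisation of lastLineContaining with an explicit default
def lastD (xs : List (Int × String)) (name : String) (d : Int) : Int :=
  match xs with
  | [] => d
  | (i, l) :: rest => if PySem.Str.find l name ≥ 0 then i else lastD rest name d

theorem lastLineContaining_eq_lastD (xs : List (Int × String)) (name : String) :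
    lastLineContaining xs name = lastD xs name 0 := by
  induction xs with
  | nil => rfl
  | cons p rest ih =>
    obtain ⟨i, l⟩ := p
    simp [lastLineContaining, lastD, ih]

theorem lastD_append_singleton (xs : List (Int × String)) (name : String)
    (c : Int) (l : String) (d : Int) :
    lastD (xs ++ [(c, l)]) name d
      = lastD xs name (if PySem.Str.find l name ≥ 0 then c else d) := by
  induction xs with
  | nil => rfl
  | cons p rest ih =>
    obtain ⟨j, m⟩ := p
    simp only [List.cons_append, lastD, ih]

theorem fold_eq_lastD (t n : String) :
    ∀ (lines : List String) (s e c : Int),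
      lines.foldl
        (fun (st : Int × Int × Int) line =>
          let start := if PySem.Str.find line t ≥ 0 then st.2.2 else st.1
          let en := if PySem.Str.find line n ≥ 0 then st.2.2 else st.2.1
          (start, en, st.2.2 + 1)) (s, e, c)
      = (lastD (PySem.List.enumerate lines c).reverse t s,
         lastD (PySem.List.enumerate lines c).reverse n e,
         c + lines.length) := by
  intro lines
  induction lines with
  | nil => intro s e c; simp [PySem.List.enumerate_nil, lastD]
  | cons l ls ih =>
    intro s e c
    simp only [List.foldl_cons, ih, PySem.List.enumerate_cons, List.reverse_cons,
      lastD_append_singleton, List.length_cons]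
    simp only [Prod.mk.injEq]
    refine ⟨trivial, trivial, by push_cast; ring⟩

-- ===== VERDICT (by name: the statement is the Claim_ definition above) =====
theorem getTableByName_spec : Claim_equal_getTableByName := by
  intro filestr tableName nextTableName _
  show getTableByName filestr tableName nextTableName
      = getTableByName_alt filestr tableName nextTableName
  unfold getTableByName getTableByName_alt
  simp only [fold_eq_lastD, lastLineContaining_eq_lastD]
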